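-- pv_equiv track=rewrite | github.com/clips/dutchclinicalnegation | src/negation_detector.py | extract_valid_modality_concept_matches
-- ===== SOURCE A (Python) =====
-- from collections import defaultdict
--
-- def extract_valid_modality_concept_matches(tags):
--     # disables modality cues for concepts which they are a part of!
--     modality_tagsets = defaultdict(set)
--     concept_tagsets = defaultdict(set)
--     for i, position_tags in enumerate(tags):
--         for tag in position_tags:
--             if tag.startswith('negation'):
--                 modality_tagsets[tag].add(i)
--             elif tag.startswith('C'):
--                 concept_tagsets[tag].add(i)
--             else:
--                 pass
--
--     valid_modality_concept_matches = defaultdict(list)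
--     for modality_cue, cue_tagindexset in modality_tagsets.items():
--         for concept, concept_tagindexset in concept_tagsets.items():
--             if not cue_tagindexset.intersection(concept_tagindexset):
--                 modality_data = (modality_cue, tuple(sorted(cue_tagindexset)))
--                 valid_modality_concept_matches[modality_data].append(concept)
--
--     return valid_modality_concept_matches
-- ===== SOURCE B (Python) =====
-- def extract_valid_modality_concept_matches(tags):
--     # Flatten once to (position, tag) pairs, collect cues/concepts in first-appearance
--     # order, then per cue re-derive its positions and the set of tags co-located with
--     # them by direct scans of the flat list; no per-pair set intersections.
--     flat = [(i, t) for i, pt in enumerate(tags) for t in pt]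
--     cues, concepts = [], []
--     for _, t in flat:
--         if t.startswith('negation'):
--             if t not in cues:
--                 cues.append(t)
--         elif t.startswith('C'):
--             if t not in concepts:
--                 concepts.append(t)
--     result = {}
--     for cue in cues:
--         positions = {i for i, t in flat if t == cue}
--         overlapping = {t for i, t in flat if i in positions}
--         valid = [c for c in concepts if c not in overlapping]
--         if valid:
--             result[(cue, tuple(sorted(positions)))] = valid
--     return result
-- ===== Notes on version B (the rewrite author's own statement) =====
-- stated objective: alternative
-- what changed: Replaces A's two defaultdict-of-set passes and the cue-by-concept set-intersection double loop by a flattened (position, tag) pair list: cues and concepts are deduplicated in first-appearance order, and per cue the positions and the set of tags co-located with them are re-derived by direct scans of the flat list, so no per-pair intersection is computed.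
import Mathlib
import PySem

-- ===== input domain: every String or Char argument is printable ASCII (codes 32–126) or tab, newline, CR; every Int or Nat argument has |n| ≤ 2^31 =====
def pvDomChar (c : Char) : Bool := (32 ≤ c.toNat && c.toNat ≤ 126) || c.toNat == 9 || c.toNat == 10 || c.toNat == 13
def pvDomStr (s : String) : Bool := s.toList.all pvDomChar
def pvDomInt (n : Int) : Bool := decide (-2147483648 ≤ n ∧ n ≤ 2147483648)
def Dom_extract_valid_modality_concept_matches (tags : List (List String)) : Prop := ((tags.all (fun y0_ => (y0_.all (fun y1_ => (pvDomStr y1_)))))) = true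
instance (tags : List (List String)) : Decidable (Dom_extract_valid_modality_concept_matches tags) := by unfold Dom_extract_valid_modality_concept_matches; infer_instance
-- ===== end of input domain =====

-- B replaces A's two defaultdict-of-set passes and the cue×concept set-intersection
-- double scan by a flat (position, tag) list: cues/concepts are deduplicated in order,
-- and each cue's positions and co-located tags are re-derived by direct scans of the
-- flat list (an alternative decomposition). Return-value equivalence; the dict is
-- returned as the flattened association list (cue, sorted cue positions, concepts).

-- ===== PORT A =====
-- first pass: modality_tagsets, concept_tagsets (defaultdict(set); d[tag].add(i) = modify tag ∅ (·.add i))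
def pvStepA (i : Int)
    (st : PySem.Dict String (PySem.Set Int) × PySem.Dict String (PySem.Set Int)) (tag : String) :
    PySem.Dict String (PySem.Set Int) × PySem.Dict String (PySem.Set Int) :=
  if PySem.Str.startswith tag "negation" then
    (st.1.modify tag PySem.Set.empty (fun s => PySem.Set.add s i), st.2)
  else if PySem.Str.startswith tag "C" then
    (st.1, st.2.modify tag PySem.Set.empty (fun s => PySem.Set.add s i))
  else st

def pvPhase1A (tags : List (List String)) :
    PySem.Dict String (PySem.Set Int) × PySem.Dict String (PySem.Set Int) :=
  (PySem.List.enumerate tags).foldl (fun st ip => ip.2.foldl (pvStepA ip.1) st)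
    (PySem.Dict.empty, PySem.Dict.empty)

-- second pass: for each cue, for each concept, append concept when the position sets are disjoint
def pvPhase2A (mt ct : PySem.Dict String (PySem.Set Int)) :
    PySem.Dict (String × List Int) (List String) :=
  mt.items.foldl (fun res mp =>
    ct.items.foldl (fun res cp =>
      if PySem.Set.inter mp.2 cp.2 = [] then
        res.insert (mp.1, PySem.List.sorted mp.2 (fun x => x) false)
          (res.getD (mp.1, PySem.List.sorted mp.2 (fun x => x) false) [] ++ [cp.1])
      else res) res) PySem.Dict.empty

def extract_valid_modality_concept_matches (tags : List (List String)) :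
    List (String × List Int × List String) :=
  let st := pvPhase1A tags
  (pvPhase2A st.1 st.2).items.map (fun p => (p.1.1, p.1.2, p.2))

-- ===== PORT B =====
-- flat = [(i, t) for i, pt in enumerate(tags) for t in pt]
def pvFlat (tags : List (List String)) : List (Int × String) :=
  (PySem.List.enumerate tags).flatMap (fun ip => ip.2.map (fun t => (ip.1, t)))

-- cues / concepts in first-appearance order ('if t not in l: l.append(t)' = Set.add)
def pvCollect (flat : List (Int × String)) : List String × List String :=
  flat.foldl (fun cc p =>
    if PySem.Str.startswith p.2 "negation" then (PySem.Set.add cc.1 p.2, cc.2)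
    else if PySem.Str.startswith p.2 "C" then (cc.1, PySem.Set.add cc.2 p.2)
    else cc) ([], [])

-- per cue: positions and overlapping tags by direct scans of flat; {…} comprehension = Set.ofList
def pvBStep (flat : List (Int × String)) (concepts : List String)
    (res : PySem.Dict (String × List Int) (List String)) (cue : String) :
    PySem.Dict (String × List Int) (List String) :=
  let positions : PySem.Set Int :=
    PySem.Set.ofList ((flat.filter (fun p => p.2 == cue)).map (fun p => p.1))
  let overlapping : PySem.Set String :=
    PySem.Set.ofList ((flat.filter (fun p => PySem.Set.contains positions p.1)).map (fun p => p.2))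
  let valid := concepts.filter (fun c => !(PySem.Set.contains overlapping c))
  if valid = [] then res
  else res.insert (cue, PySem.List.sorted positions (fun x => x) false) valid

def pvBuild (flat : List (Int × String)) (cues concepts : List String) :
    PySem.Dict (String × List Int) (List String) :=
  cues.foldl (pvBStep flat concepts) PySem.Dict.empty

def extract_valid_modality_concept_matches_alt (tags : List (List String)) :
    List (String × List Int × List String) :=
  let flat := pvFlat tags
  let cc := pvCollect flat
  (pvBuild flat cc.1 cc.2).items.map (fun p => (p.1.1, p.1.2, p.2))

-- ===== PRECONDITION & SPEC =====
def Spec_extract_valid_modality_concept_matches (tags : List (List String)) (out : List (String × List Int × List String)) : Prop := out = extract_valid_modality_concept_matches_alt tags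
instance (tags : List (List String)) (out : List (String × List Int × List String)) : Decidable (Spec_extract_valid_modality_concept_matches tags out) := by unfold Spec_extract_valid_modality_concept_matches; infer_instance

-- ===== CLAIM (what is proved, stated in full; the proofs are below) =====
def Claim_equal_extract_valid_modality_concept_matches : Prop := ∀ (tags : List (List String)), Dom_extract_valid_modality_concept_matches tags → Spec_extract_valid_modality_concept_matches tags (extract_valid_modality_concept_matches tags)

-- ===== LEMMAS AND PROOFS =====

theorem pv_nodup_keys_modify {κ ν : Type} [BEq κ] [LawfulBEq κ] (d : PySem.Dict κ ν) (k : κ)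
    (d0 : ν) (f : ν → ν) (h : d.keys.Nodup) : (d.modify k d0 f).keys.Nodup := by
  rw [PySem.Dict.keys_modify]
  exact PySem.Dict.nodup_keys_insert _ _ _ h

-- A's first-pass state, characterised against B's flat list: keys are B's dedup lists,
-- values are (as sets) the positions where the tag occurs in the processed prefix
def pvCharA (P : List (Int × String))
    (a : PySem.Dict String (PySem.Set Int) × PySem.Dict String (PySem.Set Int)) : Prop :=
  a.1.keys = (pvCollect P).1 ∧ a.2.keys = (pvCollect P).2 ∧
  a.1.keys.Nodup ∧ a.2.keys.Nodup ∧
  (∀ t, (a.1.getD t PySem.Set.empty).Nodup) ∧ (∀ t, (a.2.getD t PySem.Set.empty).Nodup) ∧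
  (∀ t i, i ∈ a.1.getD t PySem.Set.empty ↔
    ((i, t) ∈ P ∧ PySem.Str.startswith t "negation" = true)) ∧
  (∀ t i, i ∈ a.2.getD t PySem.Set.empty ↔
    ((i, t) ∈ P ∧ PySem.Str.startswith t "negation" = false ∧ PySem.Str.startswith t "C" = true))

-- one fold step of pvCollect, in closed form
theorem pvCollect_append_singleton (P : List (Int × String)) (pi : Int) (pt : String) :
    pvCollect (P ++ [(pi, pt)]) =
      (if PySem.Str.startswith pt "negation" then
        (PySem.Set.add (pvCollect P).1 pt, (pvCollect P).2)
      else if PySem.Str.startswith pt "C" then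
        ((pvCollect P).1, PySem.Set.add (pvCollect P).2 pt)
      else pvCollect P) := by
  unfold pvCollect
  rw [List.foldl_append]
  rfl

theorem pvCharA_step (P : List (Int × String)) (p : Int × String)
    (a : PySem.Dict String (PySem.Set Int) × PySem.Dict String (PySem.Set Int))
    (h : pvCharA P a) : pvCharA (P ++ [p]) (pvStepA p.1 a p.2) := by
  obtain ⟨h1, h2, h3, h4, h5, h6, h7, h8⟩ := h
  obtain ⟨pi, pt⟩ := p
  show pvCharA (P ++ [(pi, pt)]) (pvStepA pi a pt)
  have hcol := pvCollect_append_singleton P pi pt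
  by_cases hneg : PySem.Str.startswith pt "negation"
  · have hstep : pvStepA pi a pt =
        (a.1.modify pt PySem.Set.empty (fun s => PySem.Set.add s pi), a.2) := by
      unfold pvStepA; rw [if_pos hneg]
    rw [if_pos hneg] at hcol
    unfold pvCharA
    rw [hcol]
    simp only [hstep]
    refine ⟨?_, h2, pv_nodup_keys_modify _ _ _ _ h3, h4, ?_, h6, ?_, ?_⟩
    · rw [PySem.Dict.keys_modify]
      by_cases hc : a.1.contains pt
      · rw [PySem.Dict.keys_insert_of_contains _ _ hc, h1,
          PySem.Set.add_of_mem (h1 ▸ (PySem.Dict.contains_iff_mem_keys _ _).mp hc)]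
      · rw [PySem.Dict.keys_insert_of_not_contains _ _ (by simpa using hc), h1,
          PySem.Set.add_of_not_mem
            (fun hm => (by simpa using hc : ¬ a.1.contains pt = true)
              ((PySem.Dict.contains_iff_mem_keys _ _).mpr (h1 ▸ hm)))]
    · intro t
      rw [PySem.Dict.getD_modify]
      by_cases ht : t = pt
      · rw [if_pos ht]; exact PySem.Set.nodup_add _ _ (h5 pt)
      · rw [if_neg ht]; exact h5 t
    · intro t i
      rw [PySem.Dict.getD_modify]
      by_cases ht : t = pt
      · subst ht
        rw [if_pos rfl, PySem.Set.mem_add, h7]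
        constructor
        · rintro (⟨hm, _⟩ | rfl)
          · exact ⟨List.mem_append_left _ hm, hneg⟩
          · exact ⟨List.mem_append_right _ (by simp), hneg⟩
        · rintro ⟨hm, _⟩
          rcases List.mem_append.mp hm with hm | hm
          · exact Or.inl ⟨hm, hneg⟩
          · simp only [List.mem_singleton, Prod.mk.injEq, and_true] at hm
            exact Or.inr hm
      · rw [if_neg ht, h7]
        constructor
        · rintro ⟨hm, hn⟩; exact ⟨List.mem_append_left _ hm, hn⟩
        · rintro ⟨hm, hn⟩
          rcases List.mem_append.mp hm with hm | hm
          · exact ⟨hm, hn⟩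
          · simp only [List.mem_singleton, Prod.mk.injEq] at hm
            exact absurd hm.2 ht
    · intro t i
      rw [h8]
      constructor
      · rintro ⟨hm, hn⟩; exact ⟨List.mem_append_left _ hm, hn⟩
      · rintro ⟨hm, hn⟩
        rcases List.mem_append.mp hm with hm | hm
        · exact ⟨hm, hn⟩
        · simp only [List.mem_singleton, Prod.mk.injEq] at hm
          rw [hm.2, hneg] at hn
          exact Bool.noConfusion hn.1
  · have hnegf : PySem.Str.startswith pt "negation" = false := by simpa using hneg
    by_cases hC : PySem.Str.startswith pt "C"
    · have hstep : pvStepA pi a pt =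
          (a.1, a.2.modify pt PySem.Set.empty (fun s => PySem.Set.add s pi)) := by
        unfold pvStepA; rw [if_neg hneg, if_pos hC]
      rw [if_neg hneg, if_pos hC] at hcol
      unfold pvCharA
      rw [hcol]
      simp only [hstep]
      refine ⟨h1, ?_, h3, pv_nodup_keys_modify _ _ _ _ h4, h5, ?_, ?_, ?_⟩
      · rw [PySem.Dict.keys_modify]
        by_cases hc : a.2.contains pt
        · rw [PySem.Dict.keys_insert_of_contains _ _ hc, h2,
            PySem.Set.add_of_mem (h2 ▸ (PySem.Dict.contains_iff_mem_keys _ _).mp hc)]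
        · rw [PySem.Dict.keys_insert_of_not_contains _ _ (by simpa using hc), h2,
            PySem.Set.add_of_not_mem
              (fun hm => (by simpa using hc : ¬ a.2.contains pt = true)
                ((PySem.Dict.contains_iff_mem_keys _ _).mpr (h2 ▸ hm)))]
      · intro t
        rw [PySem.Dict.getD_modify]
        by_cases ht : t = pt
        · rw [if_pos ht]; exact PySem.Set.nodup_add _ _ (h6 pt)
        · rw [if_neg ht]; exact h6 t
      · intro t i
        rw [h7]
        constructor
        · rintro ⟨hm, hn⟩; exact ⟨List.mem_append_left _ hm, hn⟩
        · rintro ⟨hm, hn⟩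
          rcases List.mem_append.mp hm with hm | hm
          · exact ⟨hm, hn⟩
          · simp only [List.mem_singleton, Prod.mk.injEq] at hm
            rw [hm.2, hnegf] at hn
            exact Bool.noConfusion hn
      · intro t i
        rw [PySem.Dict.getD_modify]
        by_cases ht : t = pt
        · subst ht
          rw [if_pos rfl, PySem.Set.mem_add, h8]
          constructor
          · rintro (⟨hm, hp⟩ | rfl)
            · exact ⟨List.mem_append_left _ hm, hp⟩
            · exact ⟨List.mem_append_right _ (by simp), hnegf, hC⟩
          · rintro ⟨hm, hp⟩
            rcases List.mem_append.mp hm with hm | hm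
            · exact Or.inl ⟨hm, hp⟩
            · simp only [List.mem_singleton, Prod.mk.injEq, and_true] at hm
              exact Or.inr hm
        · rw [if_neg ht, h8]
          constructor
          · rintro ⟨hm, hp⟩; exact ⟨List.mem_append_left _ hm, hp⟩
          · rintro ⟨hm, hp⟩
            rcases List.mem_append.mp hm with hm | hm
            · exact ⟨hm, hp⟩
            · simp only [List.mem_singleton, Prod.mk.injEq] at hm
              exact absurd hm.2 ht
    · have hCf : PySem.Str.startswith pt "C" = false := by simpa using hC
      have hstep : pvStepA pi a pt = a := by
        unfold pvStepA; rw [if_neg hneg, if_neg hC]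
      rw [if_neg hneg, if_neg hC] at hcol
      unfold pvCharA
      rw [hcol]
      simp only [hstep]
      refine ⟨h1, h2, h3, h4, h5, h6, ?_, ?_⟩
      · intro t i
        rw [h7]
        constructor
        · rintro ⟨hm, hn⟩; exact ⟨List.mem_append_left _ hm, hn⟩
        · rintro ⟨hm, hn⟩
          rcases List.mem_append.mp hm with hm | hm
          · exact ⟨hm, hn⟩
          · simp only [List.mem_singleton, Prod.mk.injEq] at hm
            rw [hm.2, hnegf] at hn
            exact Bool.noConfusion hn
      · intro t i
        rw [h8]
        constructor
        · rintro ⟨hm, hn⟩; exact ⟨List.mem_append_left _ hm, hn⟩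
        · rintro ⟨hm, hn⟩
          rcases List.mem_append.mp hm with hm | hm
          · exact ⟨hm, hn⟩
          · simp only [List.mem_singleton, Prod.mk.injEq] at hm
            rw [hm.2, hCf] at hn
            exact Bool.noConfusion hn.2

theorem pvCharA_foldl (P : List (Int × String)) :
    pvCharA P (P.foldl (fun st p => pvStepA p.1 st p.2) (PySem.Dict.empty, PySem.Dict.empty)) := by
  induction P using List.reverseRecOn with
  | nil =>
    unfold pvCharA
    refine ⟨by simp [pvCollect, PySem.Dict.keys_empty], by simp [pvCollect, PySem.Dict.keys_empty],
      by simp [PySem.Dict.keys_empty], by simp [PySem.Dict.keys_empty], ?_, ?_, ?_, ?_⟩ <;>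
      intro t <;> simp [PySem.Dict.getD_empty, PySem.Set.empty]
  | append_singleton P p ih =>
    rw [List.foldl_append]
    exact pvCharA_step P p _ ih

-- A's nested first pass is the flat fold
theorem pvPhase1A_eq_flat (tags : List (List String)) :
    pvPhase1A tags =
      (pvFlat tags).foldl (fun st p => pvStepA p.1 st p.2)
        (PySem.Dict.empty, PySem.Dict.empty) := by
  unfold pvPhase1A pvFlat
  rw [List.flatMap_def, List.foldl_flatten, List.foldl_map]
  congr 1
  funext st ip
  rw [List.foldl_map]

-- members of the collected cue / concept lists satisfy their prefix tests
theorem pvCollect_props (P : List (Int × String)) :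
    (∀ t ∈ (pvCollect P).1, PySem.Str.startswith t "negation" = true) ∧
    (∀ t ∈ (pvCollect P).2,
      PySem.Str.startswith t "negation" = false ∧ PySem.Str.startswith t "C" = true) := by
  induction P using List.reverseRecOn with
  | nil => exact ⟨by simp [pvCollect], by simp [pvCollect]⟩
  | append_singleton P p ih =>
    obtain ⟨pi, pt⟩ := p
    rw [pvCollect_append_singleton P pi pt]
    by_cases hneg : PySem.Str.startswith pt "negation"
    · rw [if_pos hneg]
      refine ⟨?_, ih.2⟩
      intro t ht
      rcases (PySem.Set.mem_add _ _ _).mp ht with ht | rfl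
      · exact ih.1 t ht
      · exact hneg
    · have hnegf : PySem.Str.startswith pt "negation" = false := by simpa using hneg
      by_cases hC : PySem.Str.startswith pt "C"
      · rw [if_neg hneg, if_pos hC]
        refine ⟨ih.1, ?_⟩
        intro t ht
        rcases (PySem.Set.mem_add _ _ _).mp ht with ht | rfl
        · exact ih.2 t ht
        · exact ⟨hnegf, hC⟩
      · rw [if_neg hneg, if_neg hC]
        exact ih

-- the collected lists are Nodup (built by Set.add from [])
theorem pvCollect_nodup (P : List (Int × String)) :
    (pvCollect P).1.Nodup ∧ (pvCollect P).2.Nodup := by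
  induction P using List.reverseRecOn with
  | nil => exact ⟨List.nodup_nil, List.nodup_nil⟩
  | append_singleton P p ih =>
    obtain ⟨pi, pt⟩ := p
    rw [pvCollect_append_singleton P pi pt]
    split_ifs
    · exact ⟨PySem.Set.nodup_add _ _ ih.1, ih.2⟩
    · exact ⟨ih.1, PySem.Set.nodup_add _ _ ih.2⟩
    · exact ih

-- A's inner loop over the concepts, all appends going to the one key K
theorem pv_innerA (K : String × List Int) (P : String × PySem.Set Int → Bool)
    (items : List (String × PySem.Set Int)) (res : PySem.Dict (String × List Int) (List String)) :
    items.foldl (fun res cp => if P cp then res.insert K (res.getD K [] ++ [cp.1]) else res) res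
      = (if ((items.filter P).map (·.1)) = [] then res
         else res.insert K (res.getD K [] ++ (items.filter P).map (·.1))) := by
  induction items generalizing res with
  | nil => simp
  | cons x xs ih =>
    simp only [List.foldl_cons, List.filter_cons]
    by_cases hp : P x
    · rw [if_pos hp, ih]
      by_cases hx : (xs.filter P).map (·.1) = []
      · simp [hp, hx]
      · simp [hp, hx, PySem.Dict.getD_insert_self, PySem.Dict.insert_insert_self]
    · simp only [Bool.not_eq_true] at hp
      rw [if_neg (by simp [hp]), ih, hp]
      simp

-- one cue of A's second pass equals B's per-cue step
theorem pv_step2_eq (flat : List (Int × String)) (ct : PySem.Dict String (PySem.Set Int))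
    (concepts : List String) (S : PySem.Set Int) (cue : String)
    (hck : ct.keys = concepts) (hnd : ct.keys.Nodup)
    (hct : ∀ c, PySem.Str.startswith c "negation" = false → PySem.Str.startswith c "C" = true →
      ∀ i, (i ∈ ct.getD c PySem.Set.empty ↔ (i, c) ∈ flat))
    (hcp : ∀ c ∈ concepts,
      PySem.Str.startswith c "negation" = false ∧ PySem.Str.startswith c "C" = true)
    (hSnd : S.Nodup) (hSm : ∀ i, i ∈ S ↔ (i, cue) ∈ flat)
    (res : PySem.Dict (String × List Int) (List String))
    (hKc : res.contains (cue, PySem.List.sorted S (fun x => x) false) = false) :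
    ct.items.foldl (fun res cp =>
      if PySem.Set.inter S cp.2 = [] then
        res.insert (cue, PySem.List.sorted S (fun x => x) false)
          (res.getD (cue, PySem.List.sorted S (fun x => x) false) [] ++ [cp.1])
      else res) res
    = pvBStep flat concepts res cue := by
  simp only [pvBStep]
  generalize hP : PySem.Set.ofList ((flat.filter (fun p => p.2 == cue)).map (fun p => p.1)) = posB
  generalize hO : PySem.Set.ofList
    ((flat.filter (fun p => PySem.Set.contains posB p.1)).map (fun p => p.2)) = ovB
  have hposm : ∀ i, i ∈ posB ↔ (i, cue) ∈ flat := by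
    intro i
    rw [← hP, PySem.Set.mem_ofList, List.mem_map]
    constructor
    · rintro ⟨p, hp, rfl⟩
      have hf := List.mem_filter.mp hp
      have h2 : p.2 = cue := by simpa using hf.2
      exact h2 ▸ hf.1
    · intro hm
      exact ⟨(i, cue), List.mem_filter.mpr ⟨hm, by simp⟩, rfl⟩
  have hsorted : PySem.List.sorted S (fun x => x) false
      = PySem.List.sorted posB (fun x => x) false := by
    apply PySem.List.sorted_eq_sorted_of_perm _ _ _ (fun a b h => h)
    apply (List.perm_ext_iff_of_nodup hSnd (hP ▸ PySem.Set.nodup_ofList _)).mpr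
    intro i
    rw [hSm i, hposm i]
  have hov : ∀ c, (PySem.Set.contains ovB c = true) ↔
      ∃ i, (i, c) ∈ flat ∧ (i, cue) ∈ flat := by
    intro c
    rw [PySem.Set.contains_iff, ← hO, PySem.Set.mem_ofList, List.mem_map]
    constructor
    · rintro ⟨p, hp, rfl⟩
      have hf := List.mem_filter.mp hp
      have hi := (hposm p.1).mp ((PySem.Set.contains_iff _ _).mp hf.2)
      exact ⟨p.1, hf.1, hi⟩
    · rintro ⟨i, hic, hicue⟩
      exact ⟨(i, c), List.mem_filter.mpr
        ⟨hic, (PySem.Set.contains_iff _ _).mpr ((hposm i).mpr hicue)⟩, rfl⟩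
  have hcond : ∀ c ∈ concepts,
      (decide (PySem.Set.inter S (ct.getD c PySem.Set.empty) = []))
        = !(PySem.Set.contains ovB c) := by
    intro c hc
    obtain ⟨hcn, hcC⟩ := hcp c hc
    have hint : (PySem.Set.inter S (ct.getD c PySem.Set.empty) = [])
        ↔ ¬ ∃ i, (i, c) ∈ flat ∧ (i, cue) ∈ flat := by
      rw [List.eq_nil_iff_forall_not_mem]
      constructor
      · rintro hall ⟨i, hic, hicue⟩
        exact hall i ((PySem.Set.mem_inter _ _ _).mpr
          ⟨(hSm i).mpr hicue, (hct c hcn hcC i).mpr hic⟩)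
      · intro hnex i hi
        obtain ⟨hiS, hiT⟩ := (PySem.Set.mem_inter _ _ _).mp hi
        exact hnex ⟨i, (hct c hcn hcC i).mp hiT, (hSm i).mp hiS⟩
    cases hb : PySem.Set.contains ovB c
    · rw [Bool.not_false, decide_eq_true_eq]
      refine hint.mpr fun hex => ?_
      have hcontra := (hov c).mpr hex
      rw [hb] at hcontra
      exact Bool.noConfusion hcontra
    · rw [Bool.not_true, decide_eq_false_iff_not]
      exact fun hnil => (hint.mp hnil) ((hov c).mp hb)
  have hA := pv_innerA (cue, PySem.List.sorted S (fun x => x) false)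
    (fun cp => decide (PySem.Set.inter S cp.2 = [])) ct.items res
  simp only [decide_eq_true_eq] at hA
  have hF : ((ct.items.filter
      (fun cp => decide (PySem.Set.inter S cp.2 = []))).map (·.1))
      = concepts.filter (fun c => !(PySem.Set.contains ovB c)) := by
    rw [PySem.Dict.items_eq_map_keys ct hnd PySem.Set.empty, List.filter_map, List.map_map]
    rw [hck]
    have hid : ((fun (x : String × PySem.Set Int) => x.1) ∘
        (fun k => (k, ct.getD k PySem.Set.empty))) = id := rfl
    rw [hid, List.map_id]
    exact List.filter_congr (fun c hc => hcond c hc)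
  rw [hA, hF, PySem.Dict.getD_of_not_contains _ _ hKc, List.nil_append, hsorted]

theorem pv_bstep_keys (flat : List (Int × String)) (concepts : List String)
    (res : PySem.Dict (String × List Int) (List String)) (cue : String) :
    ∀ K ∈ (pvBStep flat concepts res cue).keys, K ∈ res.keys ∨ K.1 = cue := by
  intro K hK
  simp only [pvBStep] at hK
  split at hK
  · exact Or.inl hK
  · by_cases hc : res.contains (cue,
      PySem.List.sorted
        (PySem.Set.ofList ((flat.filter (fun p => p.2 == cue)).map (fun p => p.1)))
        (fun x => x) false)
    · rw [PySem.Dict.keys_insert_of_contains _ _ hc] at hK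
      exact Or.inl hK
    · rw [PySem.Dict.keys_insert_of_not_contains _ _ (by simpa using hc)] at hK
      rcases List.mem_append.mp hK with hm | hm
      · exact Or.inl hm
      · simp only [List.mem_singleton] at hm
        rw [hm]
        exact Or.inr rfl

-- the second passes agree, cue by cue
theorem pv_fold2_eq (flat : List (Int × String)) (ct : PySem.Dict String (PySem.Set Int))
    (concepts : List String) (getS : String → PySem.Set Int)
    (hck : ct.keys = concepts) (hnd : ct.keys.Nodup)
    (hct : ∀ c, PySem.Str.startswith c "negation" = false → PySem.Str.startswith c "C" = true →
      ∀ i, (i ∈ ct.getD c PySem.Set.empty ↔ (i, c) ∈ flat))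
    (hcp : ∀ c ∈ concepts,
      PySem.Str.startswith c "negation" = false ∧ PySem.Str.startswith c "C" = true)
    (cues : List String) (res : PySem.Dict (String × List Int) (List String))
    (hcnd : cues.Nodup)
    (hfresh : ∀ K ∈ res.keys, K.1 ∉ cues)
    (hS : ∀ cue ∈ cues, (getS cue).Nodup ∧ (∀ i, i ∈ getS cue ↔ (i, cue) ∈ flat)) :
    cues.foldl (fun res cue =>
      ct.items.foldl (fun res cp =>
        if PySem.Set.inter (getS cue) cp.2 = [] then
          res.insert (cue, PySem.List.sorted (getS cue) (fun x => x) false)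
            (res.getD (cue, PySem.List.sorted (getS cue) (fun x => x) false) [] ++ [cp.1])
        else res) res) res
    = cues.foldl (pvBStep flat concepts) res := by
  induction cues generalizing res with
  | nil => rfl
  | cons cue rest ih =>
    simp only [List.nodup_cons] at hcnd
    obtain ⟨hcue, hrnd⟩ := hcnd
    obtain ⟨hSnd, hSm⟩ := hS cue (by simp)
    have hKc : res.contains (cue, PySem.List.sorted (getS cue) (fun x => x) false) = false := by
      rw [Bool.eq_false_iff, Ne]
      intro hc
      exact hfresh _ ((PySem.Dict.contains_iff_mem_keys _ _).mp hc) (by simp)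
    rw [List.foldl_cons, List.foldl_cons,
      pv_step2_eq flat ct concepts (getS cue) cue hck hnd hct hcp hSnd hSm res hKc]
    apply ih _ hrnd _ (fun c hc => hS c (List.mem_cons_of_mem _ hc))
    intro K hK
    rcases pv_bstep_keys flat concepts res cue K hK with hm | hm
    · exact fun h => hfresh K hm (List.mem_cons_of_mem _ h)
    · rw [hm]; exact hcue

-- ===== VERDICT (by name: the statement is the Claim_ definition above) =====
theorem extract_valid_modality_concept_matches_spec : Claim_equal_extract_valid_modality_concept_matches := by
  intro tags _
  show (pvPhase2A (pvPhase1A tags).1 (pvPhase1A tags).2).items.map (fun p => (p.1.1, p.1.2, p.2))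
      = (pvBuild (pvFlat tags) (pvCollect (pvFlat tags)).1
          (pvCollect (pvFlat tags)).2).items.map (fun p => (p.1.1, p.1.2, p.2))
  have hchar := pvCharA_foldl (pvFlat tags)
  rw [← pvPhase1A_eq_flat] at hchar
  obtain ⟨h1, h2, h3, h4, h5, h6, h7, h8⟩ := hchar
  obtain ⟨hprop1, hprop2⟩ := pvCollect_props (pvFlat tags)
  congr 1
  congr 1
  unfold pvPhase2A pvBuild
  have hAfold : (pvPhase1A tags).1.items.foldl (fun res mp =>
      (pvPhase1A tags).2.items.foldl (fun res cp =>
        if PySem.Set.inter mp.2 cp.2 = [] then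
          res.insert (mp.1, PySem.List.sorted mp.2 (fun x => x) false)
            (res.getD (mp.1, PySem.List.sorted mp.2 (fun x => x) false) [] ++ [cp.1])
        else res) res) PySem.Dict.empty
      = (pvPhase1A tags).1.keys.foldl (fun res cue =>
          (pvPhase1A tags).2.items.foldl (fun res cp =>
            if PySem.Set.inter ((pvPhase1A tags).1.getD cue PySem.Set.empty) cp.2 = [] then
              res.insert (cue,
                  PySem.List.sorted ((pvPhase1A tags).1.getD cue PySem.Set.empty)
                    (fun x => x) false)
                (res.getD (cue,
                    PySem.List.sorted ((pvPhase1A tags).1.getD cue PySem.Set.empty)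
                      (fun x => x) false) [] ++ [cp.1])
            else res) res) PySem.Dict.empty := by
    rw [PySem.Dict.items_eq_map_keys (pvPhase1A tags).1 h3 PySem.Set.empty, List.foldl_map]
  rw [hAfold, h1]
  apply pv_fold2_eq (pvFlat tags) (pvPhase1A tags).2 (pvCollect (pvFlat tags)).2
    (fun cue => (pvPhase1A tags).1.getD cue PySem.Set.empty) h2 h4
  · intro c hcn hcC i
    rw [h8]
    constructor
    · exact fun h => h.1
    · exact fun h => ⟨h, hcn, hcC⟩
  · exact hprop2
  · exact (pvCollect_nodup (pvFlat tags)).1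
  · simp [PySem.Dict.keys_empty]
  · intro cue hcue
    refine ⟨h5 cue, ?_⟩
    intro i
    rw [h7]
    constructor
    · exact fun h => h.1
    · exact fun h => ⟨h, hprop1 cue hcue⟩
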